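-- pv_equiv track=rewrite | github.com/rodrigo-pino/autogoal | autogoal/datasets/meddocan.py | get_qvals
-- ===== SOURCE A (Python) =====
-- def get_qvals(predicted, y):
--     tp = 0
--     fp = 0
--     fn = 0
--     total_sentences = 0
--     for i in range(len(y)):
--         for j in range(len(y[i])):
--             for k in range(len(y[i][j])):
--                 _, tag = y[i][j][k]
--                 _, predicted_tag = predicted[i][j][k]
--
--                 if tag != "O":
--                     if tag == predicted_tag:
--                         tp+=1
--                     else:
--                         fn+=1
--                 elif tag != predicted_tag:
--                     fp+=1
--             total_sentences+=1
--
--     return tp, fp, fn, total_sentences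
-- ===== SOURCE B (Python) =====
-- def get_qvals(predicted, y):
--     total_sentences = sum(len(doc) for doc in y)
--     pairs = [(y[i][j][k][1], predicted[i][j][k][1])
--              for i in range(len(y))
--              for j in range(len(y[i]))
--              for k in range(len(y[i][j]))]
--     tp = sum(1 for t, p in pairs if t != "O" and t == p)
--     fn = sum(1 for t, p in pairs if t != "O" and t != p)
--     fp = sum(1 for t, p in pairs if t == "O" and t != p)
--     return tp, fp, fn, total_sentences
-- ===== Notes on version B (the rewrite author's own statement) =====
-- stated objective: simpler
-- what changed: Replaces the triple index-loop with one branchy four-counter accumulator by an independent sentence count, a flat (gold,pred) tag-pair list built by one comprehension, and three separate filtered sums for tp/fn/fp.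
import Mathlib
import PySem

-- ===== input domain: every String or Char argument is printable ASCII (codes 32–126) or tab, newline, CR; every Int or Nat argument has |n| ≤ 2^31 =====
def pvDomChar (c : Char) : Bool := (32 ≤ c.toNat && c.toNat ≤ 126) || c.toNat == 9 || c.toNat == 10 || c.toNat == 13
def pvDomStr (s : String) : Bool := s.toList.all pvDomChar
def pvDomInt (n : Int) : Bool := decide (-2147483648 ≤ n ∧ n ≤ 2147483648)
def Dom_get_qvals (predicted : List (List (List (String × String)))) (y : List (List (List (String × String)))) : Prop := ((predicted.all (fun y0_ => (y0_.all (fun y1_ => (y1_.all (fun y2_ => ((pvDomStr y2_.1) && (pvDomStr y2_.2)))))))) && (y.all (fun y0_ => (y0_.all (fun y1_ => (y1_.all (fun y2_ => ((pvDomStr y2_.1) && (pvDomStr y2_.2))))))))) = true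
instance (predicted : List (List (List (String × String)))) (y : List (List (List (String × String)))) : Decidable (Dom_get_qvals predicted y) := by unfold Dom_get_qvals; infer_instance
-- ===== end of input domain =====

-- B replaces the triple index-loop with one branchy accumulator by an independent sentence
-- count plus three filtered sums over a flat (gold, pred) tag-pair list (objective: simpler).

-- ===== PORT A =====
def get_qvals (predicted : List (List (List (String × String)))) (y : List (List (List (String × String)))) : Int × Int × Int × Int :=
  (PySem.List.pyRange 0 (PySem.List.len y) 1).foldl (fun st i =>
    (PySem.List.pyRange 0 (PySem.List.len (PySem.List.pyGetD y i [])) 1).foldl (fun st j =>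
      let st2 := (PySem.List.pyRange 0 (PySem.List.len (PySem.List.pyGetD (PySem.List.pyGetD y i []) j [])) 1).foldl (fun st k =>
        let tag := (PySem.List.pyGetD (PySem.List.pyGetD (PySem.List.pyGetD y i []) j []) k ("", "")).2
        let ptag := (PySem.List.pyGetD (PySem.List.pyGetD (PySem.List.pyGetD predicted i []) j []) k ("", "")).2
        if tag ≠ "O" then
          if tag = ptag then (st.1 + 1, st.2.1, st.2.2.1, st.2.2.2)
          else (st.1, st.2.1, st.2.2.1 + 1, st.2.2.2)
        else if tag ≠ ptag then (st.1, st.2.1 + 1, st.2.2.1, st.2.2.2)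
        else st) st
      (st2.1, st2.2.1, st2.2.2.1, st2.2.2.2 + 1)) st) ((0 : Int), (0 : Int), (0 : Int), (0 : Int))

-- ===== PORT B =====
def get_qvals_alt (predicted : List (List (List (String × String)))) (y : List (List (List (String × String)))) : Int × Int × Int × Int :=
  let total : Int := (y.map (fun doc => PySem.List.len doc)).sum
  let pairs : List (String × String) :=
    (PySem.List.pyRange 0 (PySem.List.len y) 1).flatMap (fun i =>
      (PySem.List.pyRange 0 (PySem.List.len (PySem.List.pyGetD y i [])) 1).flatMap (fun j =>
        (PySem.List.pyRange 0 (PySem.List.len (PySem.List.pyGetD (PySem.List.pyGetD y i []) j [])) 1).map (fun k =>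
          ((PySem.List.pyGetD (PySem.List.pyGetD (PySem.List.pyGetD y i []) j []) k ("", "")).2,
           (PySem.List.pyGetD (PySem.List.pyGetD (PySem.List.pyGetD predicted i []) j []) k ("", "")).2))))
  let tp : Int := (pairs.countP (fun t => t.1 != "O" && t.1 == t.2) : Nat)
  let fn : Int := (pairs.countP (fun t => t.1 != "O" && t.1 != t.2) : Nat)
  let fp : Int := (pairs.countP (fun t => t.1 == "O" && t.1 != t.2) : Nat)
  (tp, fp, fn, total)

-- ===== PRECONDITION & SPEC =====
-- Pre_ excludes exactly the inputs on which A raises IndexError: some gold token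
-- y[i][j][k] has no counterpart predicted[i][j][k].
def Pre_get_qvals (predicted : List (List (List (String × String)))) (y : List (List (List (String × String)))) : Prop :=
  ((List.range y.length).all (fun i => (List.range (y.getD i []).length).all (fun j =>
    ((y.getD i []).getD j []).length ≤ ((predicted.getD i []).getD j []).length))) = true
instance (predicted : List (List (List (String × String)))) (y : List (List (List (String × String)))) : Decidable (Pre_get_qvals predicted y) := by unfold Pre_get_qvals; infer_instance
def pvWitness_get_qvals : (List (List (List (String × String)))) × (List (List (List (String × String)))) :=
  ([[[("w", "B-X")], []]], [[[("w", "O")], []]])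

def Spec_get_qvals (predicted : List (List (List (String × String)))) (y : List (List (List (String × String)))) (out : Int × Int × Int × Int) : Prop := out = get_qvals_alt predicted y
instance (predicted : List (List (List (String × String)))) (y : List (List (List (String × String)))) (out : Int × Int × Int × Int) : Decidable (Spec_get_qvals predicted y out) := by unfold Spec_get_qvals; infer_instance

-- ===== CLAIM (what is proved, stated in full; the proofs are below) =====
def Claim_equal_get_qvals : Prop := ∀ (predicted : List (List (List (String × String)))) (y : List (List (List (String × String)))), Dom_get_qvals predicted y → Pre_get_qvals predicted y → Spec_get_qvals predicted y (get_qvals predicted y)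

-- ===== LEMMAS AND PROOFS =====

def cTp (t : String × String) : Bool := t.1 != "O" && t.1 == t.2
def cFp (t : String × String) : Bool := t.1 == "O" && t.1 != t.2
def cFn (t : String × String) : Bool := t.1 != "O" && t.1 != t.2

def step3 (tag ptag : String) (st : Int × Int × Int × Int) : Int × Int × Int × Int :=
  if tag ≠ "O" then
    if tag = ptag then (st.1 + 1, st.2.1, st.2.2.1, st.2.2.2)
    else (st.1, st.2.1, st.2.2.1 + 1, st.2.2.2)
  else if tag ≠ ptag then (st.1, st.2.1 + 1, st.2.2.1, st.2.2.2)
  else st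

def tokPairs (sp sy : List (String × String)) : List (String × String) :=
  (sp.zip sy).map (fun t => (t.2.2, t.1.2))

lemma tok_fold (zs : List (String × String)) :
    ∀ (ps : List (String × String)), zs.length ≤ ps.length → ∀ (st : Int × Int × Int × Int),
    (List.range zs.length).foldl (fun st k => step3 (zs.getD k ("", "")).2 (ps.getD k ("", "")).2 st) st
      = (st.1 + ((tokPairs ps zs).countP cTp : Nat), st.2.1 + ((tokPairs ps zs).countP cFp : Nat),
         st.2.2.1 + ((tokPairs ps zs).countP cFn : Nat), st.2.2.2) := by
  induction zs with
  | nil => intro ps _ st; simp [tokPairs]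
  | cons z zs ih =>
    intro ps h st
    cases ps with
    | nil => simp at h
    | cons q ps =>
      rw [List.length_cons, List.range_succ_eq_map]
      simp only [List.foldl_cons, List.foldl_map, List.getD_cons_zero, Nat.succ_eq_add_one,
        List.getD_cons_succ]
      rw [ih ps (by simpa using h) (step3 z.2 q.2 st)]
      have hp : tokPairs (q :: ps) (z :: zs) = (z.2, q.2) :: tokPairs ps zs := by
        simp [tokPairs]
      rw [hp]
      by_cases h1 : z.2 = "O" <;> by_cases h2 : z.2 = q.2
      · have hq : q.2 = "O" := h2 ▸ h1
        simp [step3, cTp, cFp, cFn, h1, hq]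
      · have hq : ¬ ("O" = q.2) := fun hh => h2 (h1.trans hh)
        simp [step3, cTp, cFp, cFn, h1, hq, Prod.ext_iff]
        omega
      · have hq : ¬ (q.2 = "O") := h2 ▸ h1
        simp [step3, cTp, cFp, cFn, h2, hq, Prod.ext_iff]
        omega
      · simp [step3, cTp, cFp, cFn, h1, h2, Prod.ext_iff]
        omega

def sentPairs (dp dy : List (List (String × String))) : List (String × String) :=
  (dp.zip dy).flatMap (fun s => tokPairs s.1 s.2)

def allPairs (p y : List (List (List (String × String)))) : List (String × String) :=
  (p.zip y).flatMap (fun d => sentPairs d.1 d.2)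

def pack (st : Int × Int × Int × Int) : Int × Int × Int × Int :=
  (st.1, st.2.1, st.2.2.1, st.2.2.2 + 1)

lemma sent_fold (ds : List (List (String × String))) :
    ∀ (psd : List (List (String × String))),
    (∀ j, j < ds.length → (ds.getD j []).length ≤ (psd.getD j []).length) →
    ∀ (st : Int × Int × Int × Int),
    (List.range ds.length).foldl (fun st j =>
      pack ((List.range (ds.getD j []).length).foldl (fun st k =>
        step3 ((ds.getD j []).getD k ("", "")).2 ((psd.getD j []).getD k ("", "")).2 st) st)) st
      = (st.1 + ((sentPairs psd ds).countP cTp : Nat), st.2.1 + ((sentPairs psd ds).countP cFp : Nat),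
         st.2.2.1 + ((sentPairs psd ds).countP cFn : Nat), st.2.2.2 + (ds.length : Nat)) := by
  induction ds with
  | nil => intro psd _ st; simp [sentPairs]
  | cons d ds ih =>
    intro psd h st
    cases psd with
    | nil =>
      have hd : d = [] := by
        have := h 0 (by simp)
        simpa using this
      subst hd
      rw [List.length_cons, List.range_succ_eq_map]
      have hI := ih [] (fun j hj => by simpa using h (j + 1) (by simpa using hj))
      simp only [List.getD_nil] at hI
      simp only [List.foldl_cons, List.foldl_map, List.getD_cons_zero, Nat.succ_eq_add_one,
        List.getD_cons_succ, List.getD_nil, List.length_nil, List.range_zero, List.foldl_nil]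
      rw [hI]
      simp [sentPairs, pack, Prod.ext_iff]
      omega
    | cons q psd =>
      rw [List.length_cons, List.range_succ_eq_map]
      simp only [List.foldl_cons, List.foldl_map, List.getD_cons_zero, Nat.succ_eq_add_one,
        List.getD_cons_succ]
      rw [tok_fold d q (by simpa using h 0 (by simp)) st]
      rw [ih psd (fun j hj => by simpa using h (j + 1) (by simpa using hj))]
      have hp : sentPairs (q :: psd) (d :: ds) = tokPairs q d ++ sentPairs psd ds := by
        simp [sentPairs]
      rw [hp]
      simp only [List.countP_append, pack, Prod.ext_iff]
      refine ⟨by push_cast; ring, by push_cast; ring, by push_cast; ring, by push_cast; ring⟩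

lemma doc_fold (ys : List (List (List (String × String)))) :
    ∀ (pss : List (List (List (String × String)))),
    (∀ i, i < ys.length → ∀ j, j < (ys.getD i []).length →
      ((ys.getD i []).getD j []).length ≤ ((pss.getD i []).getD j []).length) →
    ∀ (st : Int × Int × Int × Int),
    (List.range ys.length).foldl (fun st i =>
      (List.range (ys.getD i []).length).foldl (fun st j =>
        pack ((List.range ((ys.getD i []).getD j []).length).foldl (fun st k =>
          step3 (((ys.getD i []).getD j []).getD k ("", "")).2 (((pss.getD i []).getD j []).getD k ("", "")).2 st) st)) st) st
      = (st.1 + ((allPairs pss ys).countP cTp : Nat), st.2.1 + ((allPairs pss ys).countP cFp : Nat),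
         st.2.2.1 + ((allPairs pss ys).countP cFn : Nat),
         st.2.2.2 + (ys.map (fun d => (d.length : Int))).sum) := by
  induction ys with
  | nil => intro pss _ st; simp [allPairs]
  | cons dy ys ih =>
    intro pss h st
    cases pss with
    | nil =>
      rw [List.length_cons, List.range_succ_eq_map]
      have hS := sent_fold dy [] (fun j hj => by simpa using h 0 (by simp) j hj) st
      simp only [List.getD_nil] at hS
      have hI := ih [] (fun i hi => by simpa using h (i + 1) (by simpa using hi))
      simp only [List.getD_nil] at hI
      simp only [List.foldl_cons, List.foldl_map, List.getD_cons_zero, Nat.succ_eq_add_one,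
        List.getD_cons_succ, List.getD_nil]
      rw [hS]
      rw [hI]
      simp [allPairs, sentPairs, Prod.ext_iff]
      omega
    | cons dp pss =>
      rw [List.length_cons, List.range_succ_eq_map]
      simp only [List.foldl_cons, List.foldl_map, List.getD_cons_zero, Nat.succ_eq_add_one,
        List.getD_cons_succ]
      rw [sent_fold dy dp (fun j hj => by simpa using h 0 (by simp) j hj) st]
      rw [ih pss (fun i hi => by simpa using h (i + 1) (by simpa using hi))]
      have hp : allPairs (dp :: pss) (dy :: ys) = sentPairs dp dy ++ allPairs pss ys := by
        simp [allPairs]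
      rw [hp]
      simp only [List.countP_append, List.map_cons, List.sum_cons, Prod.ext_iff]
      refine ⟨by push_cast; ring, by push_cast; ring, by push_cast; ring, by ring⟩

lemma tokB (zs : List (String × String)) :
    ∀ (ps : List (String × String)), zs.length ≤ ps.length →
    (List.range zs.length).map (fun k => ((zs.getD k ("", "")).2, (ps.getD k ("", "")).2)) = tokPairs ps zs := by
  induction zs with
  | nil => intro ps _; simp [tokPairs]
  | cons z zs ih =>
    intro ps h
    cases ps with
    | nil => simp at h
    | cons q ps =>
      rw [List.length_cons, List.range_succ_eq_map]
      simp only [List.map_cons, List.map_map, Function.comp_def, Nat.succ_eq_add_one,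
        List.getD_cons_zero, List.getD_cons_succ]
      rw [ih ps (by simpa using h)]
      simp [tokPairs]

lemma sentB (ds : List (List (String × String))) :
    ∀ (psd : List (List (String × String))),
    (∀ j, j < ds.length → (ds.getD j []).length ≤ (psd.getD j []).length) →
    (List.range ds.length).flatMap (fun j =>
      (List.range (ds.getD j []).length).map (fun k =>
        (((ds.getD j []).getD k ("", "")).2, ((psd.getD j []).getD k ("", "")).2))) = sentPairs psd ds := by
  induction ds with
  | nil => intro psd _; simp [sentPairs]
  | cons d ds ih =>
    intro psd h
    cases psd with
    | nil =>
      have hd : d = [] := by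
        have := h 0 (by simp)
        simpa using this
      subst hd
      have hI := ih [] (fun j hj => by simpa using h (j + 1) (by simpa using hj))
      simp only [List.getD_nil] at hI
      rw [List.length_cons, List.range_succ_eq_map]
      simp only [List.flatMap_cons, List.flatMap_map, Nat.succ_eq_add_one,
        List.getD_cons_zero, List.getD_cons_succ, List.getD_nil, List.length_nil,
        List.range_zero, List.map_nil, List.nil_append]
      rw [hI]
      simp [sentPairs]
    | cons q psd =>
      rw [List.length_cons, List.range_succ_eq_map]
      simp only [List.flatMap_cons, List.flatMap_map, Nat.succ_eq_add_one,
        List.getD_cons_zero, List.getD_cons_succ]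
      rw [tokB d q (by simpa using h 0 (by simp))]
      rw [ih psd (fun j hj => by simpa using h (j + 1) (by simpa using hj))]
      simp [sentPairs]

lemma docB (ys : List (List (List (String × String)))) :
    ∀ (pss : List (List (List (String × String)))),
    (∀ i, i < ys.length → ∀ j, j < (ys.getD i []).length →
      ((ys.getD i []).getD j []).length ≤ ((pss.getD i []).getD j []).length) →
    (List.range ys.length).flatMap (fun i =>
      (List.range (ys.getD i []).length).flatMap (fun j =>
        (List.range ((ys.getD i []).getD j []).length).map (fun k =>
          ((((ys.getD i []).getD j []).getD k ("", "")).2,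
           (((pss.getD i []).getD j []).getD k ("", "")).2)))) = allPairs pss ys := by
  induction ys with
  | nil => intro pss _; simp [allPairs]
  | cons dy ys ih =>
    intro pss h
    cases pss with
    | nil =>
      have hS := sentB dy [] (fun j hj => by simpa using h 0 (by simp) j hj)
      simp only [List.getD_nil] at hS
      have hI := ih [] (fun i hi => by simpa using h (i + 1) (by simpa using hi))
      simp only [List.getD_nil] at hI
      rw [List.length_cons, List.range_succ_eq_map]
      simp only [List.flatMap_cons, List.flatMap_map, Nat.succ_eq_add_one,
        List.getD_cons_zero, List.getD_cons_succ, List.getD_nil]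
      rw [hS, hI]
      simp [allPairs, sentPairs]
    | cons dp pss =>
      rw [List.length_cons, List.range_succ_eq_map]
      simp only [List.flatMap_cons, List.flatMap_map, Nat.succ_eq_add_one,
        List.getD_cons_zero, List.getD_cons_succ]
      rw [sentB dy dp (fun j hj => by simpa using h 0 (by simp) j hj)]
      rw [ih pss (fun i hi => by simpa using h (i + 1) (by simpa using hi))]
      simp [allPairs]

-- ===== VERDICT (by name: the statement is the Claim_ definition above) =====
theorem get_qvals_spec : Claim_equal_get_qvals := by
  intro p y _ hpre
  unfold Spec_get_qvals get_qvals get_qvals_alt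
  unfold Pre_get_qvals at hpre
  have hpre' : ∀ i, i < y.length → ∀ j, j < (y.getD i []).length →
      ((y.getD i []).getD j []).length ≤ ((p.getD i []).getD j []).length := by
    simpa [List.all_eq_true, List.mem_range] using hpre
  have h := doc_fold y p hpre' ((0 : Int), (0 : Int), (0 : Int), (0 : Int))
  simp only [pack, step3] at h
  unfold cTp cFp cFn at h
  have hB := docB y p hpre'
  simp only [PySem.List.len_eq, PySem.List.pyRange_zero_nat, List.foldl_map, List.flatMap_map,
    List.map_map, Function.comp_def, PySem.List.pyGetD_natCast]
  rw [hB, h]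
  simp
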